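-- pv_equiv track=rewrite | github.com/kazamazza/pokerai | ml/coverage/coverage_equitynet.py | _infer_opener_action_from_filename
-- ===== SOURCE A (Python) =====
-- from typing import Dict, Tuple, Optional, Iterable, List
--
-- _POS_NAMES = {"UTG", "HJ", "CO", "BTN", "SB", "BB"}
--
-- _ACTION_ALIASES = {
--     "OPEN": "OPEN",
--     "MIN": "MIN", "MINRAISE": "MIN",
--     "RAISE": "RAISE",
--     "AI": "ALL_IN", "ALLIN": "ALL_IN", "ALL_IN": "ALL_IN",
--     "LIMP": "LIMP",
--     "CALL": "CALL",
--     "FOLD": "FOLD",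
--     "3BET": "RAISE", "4BET": "RAISE",  # you can refine later if needed
-- }
--
-- def _to_alias(tok: str) -> Optional[str]:
--     t = tok.upper()
--     return _ACTION_ALIASES.get(t)
--
-- def _infer_opener_action_from_filename(stem: str) -> Optional[str]:
--     """
--     Heuristic: filenames look like 'UTG_Min_HJ_Fold_CO_Call_...'
--     We prefer the earliest token pair that looks like '<POS>_<ACTION>' and treat that as the opener.
--     Returns normalized action (e.g., 'MIN', 'ALL_IN', 'OPEN', ...), or None if not found.
--     """
--     # Split by underscores and tidy
--     parts = [p for p in stem.replace("__", "_").split("_") if p]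
--     # Scan for POS + ACTION pairs
--     for i in range(len(parts) - 1):
--         pos, act = parts[i].upper(), parts[i+1].upper()
--         if pos in _POS_NAMES:
--             alias = _to_alias(act)
--             if alias:
--                 return alias
--     # Fallback: single action present somewhere
--     for p in parts:
--         alias = _to_alias(p)
--         if alias:
--             return alias
--     return None
-- ===== SOURCE B (Python) =====
-- from typing import Optional
--
-- _POS_NAMES = {"UTG", "HJ", "CO", "BTN", "SB", "BB"}
--
-- _ACTION_ALIASES = {
--     "OPEN": "OPEN",
--     "MIN": "MIN", "MINRAISE": "MIN",
--     "RAISE": "RAISE",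
--     "AI": "ALL_IN", "ALLIN": "ALL_IN", "ALL_IN": "ALL_IN",
--     "LIMP": "LIMP",
--     "CALL": "CALL",
--     "FOLD": "FOLD",
--     "3BET": "RAISE", "4BET": "RAISE",
-- }
--
-- def _to_alias(tok: str) -> Optional[str]:
--     return _ACTION_ALIASES.get(tok.upper())
--
-- def _infer_opener_action_from_filename(stem: str) -> Optional[str]:
--     # Single pass: return the earliest <POS>_<ACTION> pair match immediately;
--     # meanwhile remember the earliest standalone action alias as a fallback.
--     parts = [p for p in stem.replace("__", "_").split("_") if p]
--     fallback = None
--     for i, p in enumerate(parts):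
--         if fallback is None:
--             fallback = _to_alias(p)
--         if i + 1 < len(parts) and p.upper() in _POS_NAMES:
--             alias = _to_alias(parts[i + 1])
--             if alias:
--                 return alias
--     return fallback
-- ===== Notes on version B (the rewrite author's own statement) =====
-- stated objective: simpler
-- what changed: Replaces A's two sequential scans over the token list (all POS+ACTION pairs first, then a full rescan for a standalone action) with a single pass that returns the earliest pair match immediately while carrying the earliest standalone action alias as a fallback accumulator.
import Mathlib
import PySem

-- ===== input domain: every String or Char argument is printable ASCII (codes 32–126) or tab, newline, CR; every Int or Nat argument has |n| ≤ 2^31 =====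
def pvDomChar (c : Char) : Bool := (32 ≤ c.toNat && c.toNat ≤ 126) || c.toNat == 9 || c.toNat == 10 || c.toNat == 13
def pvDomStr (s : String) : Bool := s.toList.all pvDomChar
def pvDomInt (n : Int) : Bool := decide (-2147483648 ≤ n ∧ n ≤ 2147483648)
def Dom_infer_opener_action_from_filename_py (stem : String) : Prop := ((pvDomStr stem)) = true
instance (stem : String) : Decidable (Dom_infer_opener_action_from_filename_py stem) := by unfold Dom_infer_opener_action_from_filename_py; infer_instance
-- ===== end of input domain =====

-- B replaces A's two sequential scans (all POS+ACTION pairs first, then a standalone-action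
-- rescan) by one pass that carries the earliest standalone al as a fallback accumulator
-- (objective: simpler, one traversal instead of two).

-- ===== PORT A =====

-- _POS_NAMES (Python set literal)
def pvPosNames : PySem.Set String := PySem.Set.ofList ["UTG", "HJ", "CO", "BTN", "SB", "BB"]

-- _ACTION_ALIASES (Python dict literal)
def pvActionAliases : PySem.Dict String String := PySem.Dict.ofList
  [("OPEN", "OPEN"),
   ("MIN", "MIN"), ("MINRAISE", "MIN"),
   ("RAISE", "RAISE"),
   ("AI", "ALL_IN"), ("ALLIN", "ALL_IN"), ("ALL_IN", "ALL_IN"),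
   ("LIMP", "LIMP"),
   ("CALL", "CALL"),
   ("FOLD", "FOLD"),
   ("3BET", "RAISE"), ("4BET", "RAISE")]

-- _to_alias: t = tok.upper(); return _ACTION_ALIASES.get(t)
def pvToAlias (tok : String) : Option String :=
  PySem.Dict.get? pvActionAliases (PySem.Str.upper tok)

-- parts = [p for p in stem.replace("__", "_").split("_") if p]
-- ("_" ≠ "", so split? always returns some; getD [] only discharges the option)
def pvParts (stem : String) : List String :=
  ((PySem.Str.split? (PySem.Str.replace stem "__" "_") "_").getD []).filter (fun p => p != "")

-- A's first loop: for i in range(len(parts)-1): pair parts[i], parts[i+1]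
def pvAPairs : List String → Option String
  | [] => none
  | [_] => none
  | p :: q :: rest =>
      let pos := PySem.Str.upper p
      let act := PySem.Str.upper q
      if PySem.Set.contains pvPosNames pos then
        match pvToAlias act with
        | some al => some al        -- `if alias: return alias` (alias values are non-empty)
        | none => pvAPairs (q :: rest)
      else pvAPairs (q :: rest)

-- A's second loop: for p in parts: al = _to_alias(p); if al: return al
def pvAFallback : List String → Option String
  | [] => none
  | p :: rest =>
      match pvToAlias p with
      | some al => some al
      | none => pvAFallback rest

def infer_opener_action_from_filename_py (stem : String) : Option String :=
  let parts := pvParts stem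
  match pvAPairs parts with
  | some al => some al
  | none => pvAFallback parts

-- ===== PORT B =====

-- B's single pass: fallback accumulator, pair match returns immediately
def pvBLoop : List String → Option String → Option String
  | [], fallback => fallback
  | [p], fallback => if fallback = none then pvToAlias p else fallback
  | p :: q :: rest, fallback =>
      let fallback' := if fallback = none then pvToAlias p else fallback
      if PySem.Set.contains pvPosNames (PySem.Str.upper p) then
        match pvToAlias q with
        | some al => some al
        | none => pvBLoop (q :: rest) fallback'
      else pvBLoop (q :: rest) fallback'

def infer_opener_action_from_filename_py_alt (stem : String) : Option String :=
  pvBLoop (pvParts stem) none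

-- ===== PRECONDITION & SPEC =====
def Spec_infer_opener_action_from_filename_py (stem : String) (out : Option String) : Prop := out = infer_opener_action_from_filename_py_alt stem
instance (stem : String) (out : Option String) : Decidable (Spec_infer_opener_action_from_filename_py stem out) := by unfold Spec_infer_opener_action_from_filename_py; infer_instance

-- ===== CLAIM (what is proved, stated in full; the proofs are below) =====
def Claim_equal_infer_opener_action_from_filename_py : Prop := ∀ (stem : String), Dom_infer_opener_action_from_filename_py stem → Spec_infer_opener_action_from_filename_py stem (infer_opener_action_from_filename_py stem)

-- ===== LEMMAS AND PROOFS =====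

theorem upperChar_idem (c : Char) :
    PySem.Chars.upperChar (PySem.Chars.upperChar c) = PySem.Chars.upperChar c := by
  unfold PySem.Chars.upperChar PySem.Chars.islower
  split_ifs with h1 h2 <;> try rfl
  exfalso
  simp only [Bool.and_eq_true, decide_eq_true_eq, Char.le_def] at h1 h2
  have hc : 97 ≤ c.toNat ∧ c.toNat ≤ 122 := ⟨h1.1, h1.2⟩
  have hv : (c.toNat - 32).isValidChar := by left; omega
  have ht : (Char.ofNat (c.toNat - 32)).toNat = c.toNat - 32 := by
    rw [Char.toNat_ofNat, if_pos hv]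
  have h97 : (97 : UInt32) ≤ (Char.ofNat (c.toNat - 32)).val := h2.1
  have : 97 ≤ (Char.ofNat (c.toNat - 32)).toNat := by exact_mod_cast h97
  omega

theorem upper_idem (s : String) :
    PySem.Str.upper (PySem.Str.upper s) = PySem.Str.upper s := by
  unfold PySem.Str.upper PySem.Chars.upper
  simp [Function.comp_def, upperChar_idem]

-- _to_alias applied to an already-uppercased token equals _to_alias of the raw token
theorem toAlias_upper (q : String) : pvToAlias (PySem.Str.upper q) = pvToAlias q := by
  unfold pvToAlias
  rw [upper_idem]

-- Option first-some combinator used only to state the loop invariant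
def pvFirst (a b : Option String) : Option String :=
  match a with
  | some x => some x
  | none => b

-- Loop invariant: B's single pass = earliest pair match, else fallback-so-far, else A's rescan
theorem bLoop_eq (ps : List String) (fb : Option String) :
    pvBLoop ps fb = pvFirst (pvAPairs ps) (pvFirst fb (pvAFallback ps)) := by
  induction ps generalizing fb with
  | nil => cases fb <;> simp [pvBLoop, pvAPairs, pvAFallback, pvFirst]
  | cons p rest ih =>
      cases rest with
      | nil =>
          cases fb <;> cases h : pvToAlias p <;>
            simp [pvBLoop, pvAPairs, pvAFallback, pvFirst, h]
      | cons q rest' =>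
          simp only [pvBLoop, pvAPairs]
          by_cases hpos : PySem.Set.contains pvPosNames (PySem.Str.upper p) = true
          · rw [if_pos hpos, if_pos hpos, toAlias_upper]
            cases hq : pvToAlias q with
            | some a => simp [pvFirst]
            | none =>
                rw [ih]
                simp only [pvAFallback]
                cases fb <;> cases pvToAlias p <;> simp [pvFirst]
          · rw [if_neg hpos, if_neg hpos, ih]
            simp only [pvAFallback]
            cases fb <;> cases pvToAlias p <;> simp [pvFirst]

-- ===== VERDICT (by name: the statement is the Claim_ definition above) =====
theorem infer_opener_action_from_filename_py_spec : Claim_equal_infer_opener_action_from_filename_py := by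
  intro stem _
  unfold Spec_infer_opener_action_from_filename_py
  unfold infer_opener_action_from_filename_py infer_opener_action_from_filename_py_alt
  rw [bLoop_eq]
  cases h : pvAPairs (pvParts stem) <;> simp [pvFirst, h]
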